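-- pv_equiv track=rewrite | github.com/Leemotheyer/ComicMetadataManager | CreateXML.py | format_credits
-- ===== SOURCE A (Python) =====
-- from typing import Dict, List, Optional
--
-- def format_credits(credits: List[Dict], role_key: str = 'role') -> str:
--     """Format creator credits into a readable string"""
--     if not credits:
--         return ""
--
--     # Group by role
--     role_groups = {}
--     for credit in credits:
--         role = credit.get(role_key, 'Unknown')
--         name = credit.get('name', 'Unknown')
--         if role not in role_groups:
--             role_groups[role] = []
--         role_groups[role].append(name)
--
--     # Format as "Role: Name1, Name2; Role2: Name3, Name4"
--     formatted_credits = []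
--     for role, names in role_groups.items():
--         role_credits = f"{role.title()}: {', '.join(names)}"
--         formatted_credits.append(role_credits)
--
--     return "; ".join(formatted_credits)
-- ===== SOURCE B (Python) =====
-- def format_credits(credits, role_key='role'):
--     roles = list(dict.fromkeys(c.get(role_key, 'Unknown') for c in credits))
--     return "; ".join(
--         "{}: {}".format(role.title(),
--                         ", ".join(c.get('name', 'Unknown') for c in credits
--                                   if c.get(role_key, 'Unknown') == role))
--         for role in roles
--     )
-- ===== Notes on version B (the rewrite author's own statement) =====
-- stated objective: alternative
-- what changed: A builds a role->names grouping dict in one pass and formats its items; B first computes the ordered unique roles with dict.fromkeys and then rescans the credits once per role to collect that role's names.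
import Mathlib
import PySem

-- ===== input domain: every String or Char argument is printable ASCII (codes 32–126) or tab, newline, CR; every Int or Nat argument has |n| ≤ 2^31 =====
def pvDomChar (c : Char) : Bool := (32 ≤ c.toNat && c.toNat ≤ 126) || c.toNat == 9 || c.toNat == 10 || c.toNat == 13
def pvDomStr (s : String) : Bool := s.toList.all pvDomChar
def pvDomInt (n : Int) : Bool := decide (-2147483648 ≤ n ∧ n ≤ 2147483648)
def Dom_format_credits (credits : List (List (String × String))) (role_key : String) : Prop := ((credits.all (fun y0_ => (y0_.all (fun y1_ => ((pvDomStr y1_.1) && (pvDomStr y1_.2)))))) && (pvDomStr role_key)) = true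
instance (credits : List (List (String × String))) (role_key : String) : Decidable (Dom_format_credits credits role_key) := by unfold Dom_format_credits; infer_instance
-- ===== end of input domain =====

-- B replaces A's single-pass grouping dict by ordered unique roles (dict.fromkeys) followed by a
-- per-role rescan of the credits (objective: alternative; same observable result, proved below).

-- ===== PORT A =====
-- shared primitive: Python's str.title(), exact on ASCII (a letter after a non-letter is uppercased,
-- a letter after a letter is lowercased, other characters pass through)
def pyTitleChars : List Char → Bool → List Char
  | [], _ => []
  | c :: cs, prev =>
    (if PySem.Chars.isalpha c then
       (if prev then PySem.Chars.lowerChar c else PySem.Chars.upperChar c)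
     else c) :: pyTitleChars cs (PySem.Chars.isalpha c)

def pyTitle (s : String) : String := String.ofList (pyTitleChars s.toList false)

def format_credits (credits : List (List (String × String))) (role_key : String) : String :=
  if credits = [] then ""
  else
    let role_groups : PySem.Dict String (List String) :=
      credits.foldl (fun rg credit =>
        let role := (PySem.Dict.mk credit).getD role_key "Unknown"
        let name := (PySem.Dict.mk credit).getD "name" "Unknown"
        let rg := if rg.contains role then rg else rg.insert role ([] : List String)
        rg.modify role [] (fun ns => ns ++ [name])) PySem.Dict.empty
    let formatted := role_groups.items.map (fun p => pyTitle p.1 ++ ": " ++ PySem.Str.join ", " p.2)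
    PySem.Str.join "; " formatted

-- ===== PORT B =====
def format_credits_alt (credits : List (List (String × String))) (role_key : String) : String :=
  let roles := PySem.List.dedup (credits.map (fun c => (PySem.Dict.mk c).getD role_key "Unknown"))
  let pieces := roles.map (fun r =>
    pyTitle r ++ ": " ++ PySem.Str.join ", "
      ((credits.filter (fun c => (PySem.Dict.mk c).getD role_key "Unknown" == r)).map
        (fun c => (PySem.Dict.mk c).getD "name" "Unknown")))
  PySem.Str.join "; " pieces

-- ===== PRECONDITION & SPEC =====
def Spec_format_credits (credits : List (List (String × String))) (role_key : String) (out : String) : Prop := out = format_credits_alt credits role_key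
instance (credits : List (List (String × String))) (role_key : String) (out : String) : Decidable (Spec_format_credits credits role_key out) := by unfold Spec_format_credits; infer_instance

-- ===== CLAIM (what is proved, stated in full; the proofs are below) =====
def Claim_equal_format_credits : Prop := ∀ (credits : List (List (String × String))) (role_key : String), Dom_format_credits credits role_key → Spec_format_credits credits role_key (format_credits credits role_key)

-- ===== LEMMAS AND PROOFS =====

-- A's "if role not in d: d[role] = []; d[role].append(name)" is one modify
lemma pv_step_eq (d : PySem.Dict String (List String)) (role name : String) :
    (if d.contains role then d else d.insert role ([] : List String)).modify role []
        (fun ns => ns ++ [name])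
      = d.modify role [] (fun ns => ns ++ [name]) := by
  by_cases h : d.contains role
  · simp [h]
  · have h' : d.contains role = false := by simpa using h
    simp only [h', Bool.false_eq_true, if_false, PySem.Dict.modify,
      PySem.Dict.getD_insert_self, PySem.Dict.insert_insert_self,
      PySem.Dict.getD_of_not_contains d ([] : List String) h']

-- the grouping dict's items, characterised as B computes them
lemma pv_items_rg (credits : List (List (String × String))) (role_key : String) :
    (credits.foldl (fun rg credit =>
        let role := (PySem.Dict.mk credit).getD role_key "Unknown"
        let name := (PySem.Dict.mk credit).getD "name" "Unknown"
        let rg := if rg.contains role then rg else rg.insert role ([] : List String)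
        rg.modify role [] (fun ns => ns ++ [name])) PySem.Dict.empty).items
      = (PySem.List.dedup (credits.map (fun c => (PySem.Dict.mk c).getD role_key "Unknown"))).map
          (fun r => (r, (credits.filter
              (fun c => (PySem.Dict.mk c).getD role_key "Unknown" == r)).map
              (fun c => (PySem.Dict.mk c).getD "name" "Unknown"))) := by
  simp only [pv_step_eq]
  set keyOf := fun c : List (String × String) => (PySem.Dict.mk c).getD role_key "Unknown" with hk
  set nameOf := fun c : List (String × String) => (PySem.Dict.mk c).getD "name" "Unknown" with hn
  have hfold :
      credits.foldl (fun rg credit => rg.modify (keyOf credit) [] (fun ns => ns ++ [nameOf credit]))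
          PySem.Dict.empty
        = (credits.map (fun c => (keyOf c, nameOf c))).foldl
            (fun d p => d.modify p.1 [] (fun ns => ns ++ [p.2])) PySem.Dict.empty := by
    rw [List.foldl_map]
  have hkeys :
      (credits.foldl (fun rg credit =>
          rg.modify (keyOf credit) [] (fun ns => ns ++ [nameOf credit])) PySem.Dict.empty).keys
        = PySem.List.dedup (credits.map keyOf) := by
    rw [PySem.Dict.keys_foldl_modify_key credits keyOf []
      (fun _ credit => fun ns => ns ++ [nameOf credit]) PySem.Dict.empty]
    simp [PySem.Set.update_nil_left]
  have hnodup :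
      (credits.foldl (fun rg credit =>
          rg.modify (keyOf credit) [] (fun ns => ns ++ [nameOf credit])) PySem.Dict.empty).keys.Nodup := by
    exact PySem.Dict.nodup_keys_foldl_modify_key credits keyOf []
      (fun _ credit => fun ns => ns ++ [nameOf credit]) PySem.Dict.empty (by simp)
  have hget : ∀ r,
      (credits.foldl (fun rg credit =>
          rg.modify (keyOf credit) [] (fun ns => ns ++ [nameOf credit])) PySem.Dict.empty).getD r []
        = (credits.filter (fun c => keyOf c == r)).map nameOf := by
    intro r
    rw [hfold, PySem.Dict.getD_foldl_modify_append]
    simp [List.filter_map, Function.comp_def]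
  rw [PySem.Dict.items_eq_map_keys _ hnodup [], hkeys]
  exact List.map_congr_left (fun r _ => by rw [hget r])

-- ===== VERDICT (by name: the statement is the Claim_ definition above) =====
theorem format_credits_spec : Claim_equal_format_credits := by
  intro credits role_key _
  unfold Spec_format_credits format_credits format_credits_alt
  by_cases h : credits = []
  · subst h; rfl
  · simp only [h, if_false]
    rw [pv_items_rg credits role_key, List.map_map]
    rfl
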